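-- pv_equiv track=rewrite | github.com/stars-end/affordabot | backend/services/discovery/round1_benchmark.py | is_official_source
-- ===== SOURCE A (Python) =====
-- from typing import Any, Iterable, Protocol
--
-- def is_official_source(domain: str, official_domain_hints: Iterable[str]) -> bool:
--     """Determine if a domain looks official for local-government discovery."""
--     normalized_hints = {hint.lower().lstrip("www.") for hint in official_domain_hints if hint}
--     if not domain:
--         return False
--     if domain.endswith(".gov"):
--         return True
--     if domain in normalized_hints:
--         return True
--     return any(domain.endswith(f".{hint}") for hint in normalized_hints)
-- ===== SOURCE B (Python) =====
-- def is_official_source(domain, official_domain_hints):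
--     """Suffix-set decomposition: collect the domain and every dot-boundary
--     suffix, then test set intersection with the normalized hints."""
--     normalized_hints = {hint.lower().lstrip("www.") for hint in official_domain_hints if hint}
--     if not domain:
--         return False
--     if domain.endswith(".gov"):
--         return True
--     candidates = {domain}
--     for i, ch in enumerate(domain):
--         if ch == '.':
--             candidates.add(domain[i + 1:])
--     return bool(candidates & normalized_hints)
-- ===== Notes on version B (the rewrite author's own statement) =====
-- stated objective: alternative
-- what changed: Replaces the membership test plus per-hint endswith scan by building the set of the domain's dot-boundary suffixes (domain itself plus domain[i+1:] for each '.') and intersecting it with the normalized hint set.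
import Mathlib
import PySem

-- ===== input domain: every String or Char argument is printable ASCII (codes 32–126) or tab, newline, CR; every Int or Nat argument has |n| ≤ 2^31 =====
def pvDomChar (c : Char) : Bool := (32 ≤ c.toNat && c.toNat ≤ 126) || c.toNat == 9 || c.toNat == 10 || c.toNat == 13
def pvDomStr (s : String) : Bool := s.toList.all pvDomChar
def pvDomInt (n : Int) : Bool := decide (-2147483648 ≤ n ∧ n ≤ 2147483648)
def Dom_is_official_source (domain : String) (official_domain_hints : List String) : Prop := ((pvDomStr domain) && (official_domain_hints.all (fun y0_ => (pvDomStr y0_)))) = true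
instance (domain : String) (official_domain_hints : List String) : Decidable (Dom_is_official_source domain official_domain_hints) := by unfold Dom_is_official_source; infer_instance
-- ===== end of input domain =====

-- B replaces the per-hint endswith scan by a set of the domain's dot-boundary suffixes
-- intersected with the hint set (alternative decomposition; same behaviour).

-- ===== PORT A =====
-- hint.lower().lstrip("www."): lstrip(chars) drops leading characters from the set {'w','.'} — exact hand port
def pvLstripWww (s : List Char) : List Char := s.dropWhile (fun c => c == 'w' || c == '.')

-- {hint.lower().lstrip("www.") for hint in official_domain_hints if hint}
def pvNormHints (official_domain_hints : List String) : PySem.Set (List Char) :=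
  PySem.Set.ofList ((official_domain_hints.filter (fun h => h.toList ≠ [])).map
    (fun h => pvLstripWww (PySem.Chars.lower h.toList)))

def is_official_source (domain : String) (official_domain_hints : List String) : Bool :=
  let normalized_hints := pvNormHints official_domain_hints
  if domain.toList = [] then false
  else if PySem.Chars.endswith domain.toList ".gov".toList then true
  else if normalized_hints.contains domain.toList then true
  else normalized_hints.any (fun hint => PySem.Chars.endswith domain.toList ('.' :: hint))

-- ===== PORT B =====
def is_official_source_alt (domain : String) (official_domain_hints : List String) : Bool :=
  let normalized_hints := pvNormHints official_domain_hints
  if domain.toList = [] then false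
  else if PySem.Chars.endswith domain.toList ".gov".toList then true
  else
    -- candidates = {domain} plus domain[i+1:] for every '.' at index i (drop is exact for this in-range slice)
    let candidates := (PySem.List.enumerate domain.toList 0).foldl
      (fun s p => if p.2 == '.' then PySem.Set.add s (domain.toList.drop (p.1.toNat + 1)) else s)
      (PySem.Set.ofList [domain.toList])
    !(PySem.Set.inter candidates normalized_hints).isEmpty

-- ===== PRECONDITION & SPEC =====
def Spec_is_official_source (domain : String) (official_domain_hints : List String) (out : Bool) : Prop := out = is_official_source_alt domain official_domain_hints
instance (domain : String) (official_domain_hints : List String) (out : Bool) : Decidable (Spec_is_official_source domain official_domain_hints out) := by unfold Spec_is_official_source; infer_instance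

-- ===== CLAIM (what is proved, stated in full; the proofs are below) =====
def Claim_equal_is_official_source : Prop := ∀ (domain : String) (official_domain_hints : List String), Dom_is_official_source domain official_domain_hints → Spec_is_official_source domain official_domain_hints (is_official_source domain official_domain_hints)

-- ===== LEMMAS AND PROOFS =====

lemma pv_mem_foldl_add (dl : List Char) (l : List (Int × Char)) (s : PySem.Set (List Char)) (x : List Char) :
    x ∈ l.foldl (fun s p => if p.2 == '.' then PySem.Set.add s (dl.drop (p.1.toNat + 1)) else s) s
      ↔ x ∈ s ∨ ∃ p ∈ l, p.2 = '.' ∧ x = dl.drop (p.1.toNat + 1) := by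
  induction l generalizing s with
  | nil => simp
  | cons p l ih =>
    simp only [List.foldl_cons]
    by_cases hp : p.2 = '.'
    · rw [if_pos (by simp [hp]), ih]
      simp only [PySem.Set.mem_add, List.mem_cons]
      constructor
      · rintro ((h | h) | ⟨q, hq, h1, h2⟩)
        · exact Or.inl h
        · exact Or.inr ⟨p, Or.inl rfl, hp, h⟩
        · exact Or.inr ⟨q, Or.inr hq, h1, h2⟩
      · rintro (h | ⟨q, (rfl | hq), h1, h2⟩)
        · exact Or.inl (Or.inl h)
        · exact Or.inl (Or.inr h2)
        · exact Or.inr ⟨q, hq, h1, h2⟩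
    · rw [if_neg (by simp [hp]), ih]
      simp only [List.mem_cons]
      constructor
      · rintro (h | ⟨q, hq, h1, h2⟩)
        · exact Or.inl h
        · exact Or.inr ⟨q, Or.inr hq, h1, h2⟩
      · rintro (h | ⟨q, (rfl | hq), h1, h2⟩)
        · exact Or.inl h
        · exact absurd h1 hp
        · exact Or.inr ⟨q, hq, h1, h2⟩

lemma pv_mem_candidates (dl x : List Char) :
    x ∈ (PySem.List.enumerate dl 0).foldl
        (fun s p => if p.2 == '.' then PySem.Set.add s (dl.drop (p.1.toNat + 1)) else s)
        (PySem.Set.ofList [dl])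
      ↔ x = dl ∨ ∃ k : Nat, ∃ _ : k < dl.length, dl[k] = '.' ∧ x = dl.drop (k + 1) := by
  rw [pv_mem_foldl_add]
  constructor
  · rintro (h | ⟨p, hp, hdot, hx⟩)
    · left; simpa [PySem.Set.mem_ofList] using h
    · obtain ⟨k, hk, rfl⟩ := (PySem.List.mem_enumerate_iff _ _ _).mp hp
      right; exact ⟨k, hk, by simpa using hdot, by simpa using hx⟩
  · rintro (rfl | ⟨k, hk, hdot, rfl⟩)
    · left; simp [PySem.Set.mem_ofList]
    · right
      exact ⟨((k : Int), dl[k]), (PySem.List.mem_enumerate_iff _ _ _).mpr ⟨k, hk, by simp⟩,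
        hdot, by simp⟩

lemma pv_dot_suffix_iff (h dl : List Char) :
    ('.' :: h) <:+ dl ↔ ∃ k : Nat, ∃ _ : k < dl.length, dl[k] = '.' ∧ h = dl.drop (k + 1) := by
  constructor
  · rintro ⟨t, rfl⟩
    refine ⟨t.length, by simp, ?_, ?_⟩
    · simp
    · rw [← List.drop_drop, List.drop_left]
      simp
  · rintro ⟨k, hk, hdot, rfl⟩
    have : dl.drop k = dl[k] :: dl.drop (k + 1) := List.drop_eq_getElem_cons hk
    rw [← hdot, ← this]
    exact List.drop_suffix k dl

theorem is_official_source_spec : Claim_equal_is_official_source := by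
  intro domain official_domain_hints _
  unfold Spec_is_official_source is_official_source is_official_source_alt
  dsimp only
  set dl := domain.toList with hdl
  set nh := pvNormHints official_domain_hints with hnh
  by_cases h0 : dl = []
  · rw [if_pos h0, if_pos h0]
  · rw [if_neg h0, if_neg h0]
    by_cases hgov : PySem.Chars.endswith dl ".gov".toList = true
    · rw [if_pos hgov, if_pos hgov]
    · rw [if_neg hgov, if_neg hgov]
      rw [Bool.eq_iff_iff]
      have hiff : ∀ b : Bool, (if b = true then true else nh.any fun hint => PySem.Chars.endswith dl ('.' :: hint)) = true
          ↔ (b = true ∨ (nh.any fun hint => PySem.Chars.endswith dl ('.' :: hint)) = true) := by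
        intro b; cases b <;> simp
      rw [hiff]
      have hne : ∀ (l : List (List Char)), (!l.isEmpty) = true ↔ ∃ x, x ∈ l := by
        intro l; cases l <;> simp
      rw [hne]
      constructor
      · rintro (hc | hany)
        · refine ⟨dl, ?_⟩
          rw [PySem.Set.mem_inter]
          refine ⟨(pv_mem_candidates dl dl).mpr (Or.inl rfl), ?_⟩
          simpa using hc
        · obtain ⟨hint, hmem, hend⟩ := List.any_eq_true.mp hany
          have := (pv_dot_suffix_iff hint dl).mp ((PySem.Chars.endswith_iff _ _).mp hend)
          obtain ⟨k, hk, hdot, rfl⟩ := this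
          refine ⟨dl.drop (k + 1), ?_⟩
          rw [PySem.Set.mem_inter]
          exact ⟨(pv_mem_candidates dl _).mpr (Or.inr ⟨k, hk, hdot, rfl⟩), hmem⟩
      · rintro ⟨x, hx⟩
        rw [PySem.Set.mem_inter] at hx
        obtain ⟨hxc, hxn⟩ := hx
        rcases (pv_mem_candidates dl x).mp hxc with rfl | ⟨k, hk, hdot, rfl⟩
        · left; simpa using hxn
        · right
          refine List.any_eq_true.mpr ⟨dl.drop (k + 1), hxn, ?_⟩
          exact (PySem.Chars.endswith_iff _ _).mpr ((pv_dot_suffix_iff _ dl).mpr ⟨k, hk, hdot, rfl⟩)
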